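-- pv_equiv track=rewrite | github.com/JoaoDaviMNunes/Cifragem_em_Bloco | coder_ADFGVX.py | transpor
-- ===== SOURCE A (Python) =====
-- def transpor(texto, chave):
--     colunas = sorted((chave[i], i) for i in range(len(chave)))
--     texto_matriz = [texto[i:i + len(chave)] for i in range(0, len(texto), len(chave))]
--
--     ultimo_tamanho = len(texto_matriz[-1])
--     padding = len(chave) - ultimo_tamanho
--     if padding > 0:
--         texto_matriz[-1] += 'X' * padding
--
--     transposto = ""
--     for _, indice in colunas:
--         for linha in texto_matriz:
--             if indice < len(linha):
--                 transposto += linha[indice]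
--
--     transposto += str(padding)  # Adicionar padding ao final
--     return transposto
-- ===== SOURCE B (Python) =====
-- def transpor(texto, chave):
--     k = len(chave)
--     pad = -len(texto) % k
--     t = texto + 'X' * pad
--     order = sorted(range(k), key=lambda i: chave[i])
--     return ''.join(t[i::k] for i in order) + str(pad)
-- ===== Notes on version B (the rewrite author's own statement) =====
-- stated objective: alternative
-- what changed: Replaces the row-matrix build plus nested row-by-row character loop (with per-character += and bounds check) by one padded flat string read with strided slices t[i::k], and sorts key indices with a stable key-sort instead of sorting (char, index) tuples.
import Mathlib
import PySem

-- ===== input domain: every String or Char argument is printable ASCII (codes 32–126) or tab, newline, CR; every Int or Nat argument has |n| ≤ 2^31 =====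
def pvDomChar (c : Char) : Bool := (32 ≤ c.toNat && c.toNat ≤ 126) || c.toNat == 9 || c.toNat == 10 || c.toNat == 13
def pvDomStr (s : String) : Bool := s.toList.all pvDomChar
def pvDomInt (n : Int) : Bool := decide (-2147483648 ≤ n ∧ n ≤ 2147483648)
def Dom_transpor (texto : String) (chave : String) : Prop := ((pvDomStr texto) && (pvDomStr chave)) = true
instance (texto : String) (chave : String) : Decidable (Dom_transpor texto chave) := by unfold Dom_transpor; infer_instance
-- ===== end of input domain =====

-- B reads each cipher column as one strided slice of the padded flat text instead of a nested row×column loop (alternative decomposition, same asymptotic cost).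

-- ===== PORT A =====
def transpor (texto : String) (chave : String) : String :=
  let tt := texto.toList
  let ct := chave.toList
  let k : Int := ct.length
  let colunas := PySem.List.sorted2 ((PySem.List.pyRange 0 k 1).map
      (fun i => (PySem.List.pyGetD ct i ' ', i))) (fun p => p.1) (fun p => p.2)
  let matriz := (PySem.List.pyRange 0 tt.length k).map
      (fun i => PySem.List.slice tt (some i) (some (i + k)))
  let ultimo := (PySem.List.pyGet? matriz (-1)).getD []   -- texto_matriz[-1]; none = IndexError, excluded by Pre_
  let padding : Int := k - ultimo.length
  let matriz := if 0 < padding then matriz.dropLast ++ [ultimo ++ List.replicate padding.toNat 'X'] else matriz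
  let transposto := colunas.foldl (fun acc p =>
    matriz.foldl (fun acc linha =>
      if p.2 < (linha.length : Int) then acc ++ [PySem.List.pyGetD linha p.2 ' '] else acc) acc) ([] : List Char)
  String.ofList (transposto ++ PySem.Int.toChars padding)

-- ===== PORT B =====
def transpor_alt (texto : String) (chave : String) : String :=
  let tt := texto.toList
  let ct := chave.toList
  let k : Int := ct.length
  let pad := PySem.Int.mod (-(tt.length : Int)) k          -- -len(texto) % k; k = 0 raises, excluded by Pre_
  let t := tt ++ List.replicate pad.toNat 'X'
  let order := PySem.List.sorted (PySem.List.pyRange 0 k 1) (fun i => PySem.List.pyGetD ct i ' ')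
  let cols := order.map (fun i => (PySem.List.slice? t (some i) none k).getD [])
  String.ofList (PySem.Chars.join [] cols ++ PySem.Int.toChars pad)

-- ===== PRECONDITION & SPEC =====
-- Pre_ excludes exactly the crashes of A: empty texto (IndexError on texto_matriz[-1]) and empty chave (ValueError from range step 0).
def Pre_transpor (texto : String) (chave : String) : Prop := texto ≠ "" ∧ chave ≠ ""
instance (texto : String) (chave : String) : Decidable (Pre_transpor texto chave) := by unfold Pre_transpor; infer_instance
def pvWitness_transpor : String × String := ("ATTACKATDAWN", "KEYS")

def Spec_transpor (texto : String) (chave : String) (out : String) : Prop := out = transpor_alt texto chave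
instance (texto : String) (chave : String) (out : String) : Decidable (Spec_transpor texto chave out) := by unfold Spec_transpor; infer_instance

-- ===== CLAIM (what is proved, stated in full; the proofs are below) =====
def Claim_equal_transpor : Prop := ∀ (texto : String) (chave : String), Dom_transpor texto chave → Pre_transpor texto chave → Spec_transpor texto chave (transpor texto chave)
-- ===== LEMMAS AND PROOFS =====

theorem insertBy_pair_comm (key : Int → Char) (x : Int) (acc : List Int) (h : ∀ j ∈ acc, j < x) :
    PySem.List.insertBy (fun a b : Char × Int => decide (a.1 < b.1) || (!decide (b.1 < a.1) && decide (a.2 < b.2)))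
      (key x, x) (acc.map fun i => (key i, i))
    = (PySem.List.insertBy (fun a b => decide (key a < key b)) x acc).map (fun i => (key i, i)) := by
  induction acc with
  | nil => simp [PySem.List.insertBy]
  | cons y ys ih =>
    have hyx : y < x := h y (by simp)
    have hnx : ¬ x < y := by omega
    by_cases hk : key x < key y
    · simp [PySem.List.insertBy, hk]
    · simp [PySem.List.insertBy, hk, hnx, ih (fun j hj => h j (by simp [hj]))]

theorem foldl_sort_comm (key : Int → Char) : ∀ (l acc : List Int), (∀ j ∈ acc, ∀ x ∈ l, j < x) → l.Pairwise (· < ·) →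
    (l.map fun i => ((key i, i) : Char × Int)).foldl
      (fun a p => PySem.List.insertBy (fun a b : Char × Int => decide (a.1 < b.1) || (!decide (b.1 < a.1) && decide (a.2 < b.2))) p a)
      (acc.map fun i => (key i, i))
    = (l.foldl (fun a x => PySem.List.insertBy (fun a b => decide (key a < key b)) x a) acc).map (fun i => (key i, i)) := by
  intro l
  induction l with
  | nil => simp
  | cons x xs ih =>
    intro acc hacc hpw
    simp only [List.map_cons, List.foldl_cons]
    rw [insertBy_pair_comm key x acc (fun j hj => hacc j hj x (by simp))]
    exact ih _ (fun j hj z hz => by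
      rcases (PySem.List.mem_insertBy _ _ _ _).1 hj with rfl | hj
      · exact (List.pairwise_cons.1 hpw).1 z hz
      · exact hacc j hj z (by simp [hz])) (List.pairwise_cons.1 hpw).2

theorem sorted2_pairs_eq (ct : List Char) :
    PySem.List.sorted2 ((PySem.List.pyRange 0 (ct.length : Int) 1).map (fun i => (PySem.List.pyGetD ct i ' ', i)))
      (fun p => p.1) (fun p => p.2)
    = (PySem.List.sorted (PySem.List.pyRange 0 (ct.length : Int) 1) (fun i => PySem.List.pyGetD ct i ' ')).map
        (fun i => (PySem.List.pyGetD ct i ' ', i)) := by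
  simp only [PySem.List.sorted2, PySem.List.sorted, if_neg (by decide : ¬ (false = true))]
  have := foldl_sort_comm (fun i => PySem.List.pyGetD ct i ' ') (PySem.List.pyRange 0 (ct.length : Int) 1) []
    (by simp) (PySem.List.pairwise_lt_pyRange_one 0 (ct.length : Int))
  simpa using this

def pvChunk (k : Nat) (cs : List Char) : List (List Char) :=
  if _h : cs.length ≤ k ∨ k = 0 then [cs] else cs.take k :: pvChunk k (cs.drop k)
termination_by cs.length
decreasing_by simp; omega

theorem pyRange_step_shift (n k : Nat) (h0 : 0 < n) (hk : 0 < k) :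
    PySem.List.pyRange 0 (n : Int) (k : Int) = 0 :: (PySem.List.pyRange 0 ((n : Int) - k) (k : Int)).map (· + (k : Int)) := by
  rw [PySem.List.pyRange_of_pos _ _ (by exact_mod_cast hk), PySem.List.pyRange_of_pos _ _ (by exact_mod_cast hk)]
  have hq0 : (0:Int) ≤ ((n : Int) - k - 0 + k - 1) / k := by apply Int.ediv_nonneg <;> omega
  have hc : (((n : Int) - 0 + k - 1) / k).toNat = (((n : Int) - k - 0 + k - 1) / k).toNat + 1 := by
    have h1 : ((n : Int) - 0 + k - 1) = ((n : Int) - k - 0 + k - 1) + 1 * k := by ring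
    rw [h1, Int.add_mul_ediv_right _ _ (by exact_mod_cast hk.ne')]
    omega
  have hcount' : (if (0:Int) < (n:Int) - k then (((n:Int) - k - 0 + k - 1) / k).toNat else 0)
      = (((n:Int) - k - 0 + k - 1) / k).toNat := by
    split_ifs with h
    · rfl
    · have h2 : ((n : Int) - k - 0 + k - 1) / k = 0 := Int.ediv_eq_zero_of_lt (by omega) (by omega)
      simp only [show ((n:Int) - k - 0 + k - 1) = (n:Int) - 1 by ring] at h2
      simp [h2]
  rw [if_pos (by exact_mod_cast h0), hcount', hc, List.range_succ_eq_map]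
  simp only [List.map_cons, List.map_map]
  refine List.cons_eq_cons.2 ⟨by simp, ?_⟩
  exact List.map_congr_left (fun j _ => by simp [Nat.succ_eq_add_one]; ring)

theorem slice_zero_k (cs : List Char) (k : Nat) :
    PySem.List.slice cs (some 0) (some ((0:Int) + k)) = cs.take k := by
  simp [PySem.List.slice, PySem.List.clampIdx, if_neg (show ¬ ((k:Int)) < 0 by omega)]

theorem slice_shift (cs : List Char) (k : Nat) (hk : k ≤ cs.length) (i : Int) (hi : 0 ≤ i) :
    PySem.List.slice cs (some (i + k)) (some (i + k + k)) = PySem.List.slice (cs.drop k) (some i) (some (i + k)) := by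
  simp only [PySem.List.slice, PySem.List.clampIdx,
    if_neg (show ¬ (i + (k:Int)) < 0 by omega), if_neg (show ¬ (i + (k:Int) + k) < 0 by omega),
    if_neg (show ¬ i < 0 by omega)]
  rw [List.drop_drop]
  have h1 : min (i + (k:Int)).toNat cs.length = min i.toNat (cs.length - k) + k := by omega
  have h2 : min (i + (k:Int) + k).toNat cs.length - min (i + (k:Int)).toNat cs.length
      = min (i + (k:Int)).toNat (cs.length - k) - min i.toNat (cs.length - k) := by omega
  rw [List.length_drop, h1]
  rw [show min (i + (k:Int) + k).toNat cs.length - (min i.toNat (cs.length - k) + k)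
      = min (i + (k:Int)).toNat (cs.length - k) - min i.toNat (cs.length - k) by omega,
    Nat.add_comm]

theorem pyRange_nonpos (b k : Int) (hb : b ≤ 0) (hk : 0 < k) : PySem.List.pyRange 0 b k = [] := by
  rw [PySem.List.pyRange_of_pos _ _ hk, if_neg (by omega)]
  simp

theorem chunk_rows (k : Nat) (hk : 0 < k) : ∀ (cs : List Char), cs ≠ [] →
    (PySem.List.pyRange 0 (cs.length : Int) (k : Int)).map
      (fun i => PySem.List.slice cs (some i) (some (i + (k : Int)))) = pvChunk k cs := by
  intro cs
  fun_induction pvChunk k cs with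
  | case1 cs h =>
    intro hne
    have hn : 0 < cs.length := List.length_pos_of_ne_nil hne
    have hlen : cs.length ≤ k := by omega
    rw [pyRange_step_shift _ _ hn hk, pyRange_nonpos _ _ (by omega) (by exact_mod_cast hk)]
    simp [List.take_of_length_le hlen]
  | case2 cs h ih =>
    intro _
    have hn : 0 < cs.length := by omega
    have hkn : k < cs.length := by omega
    rw [pyRange_step_shift _ _ hn hk]
    simp only [List.map_cons, List.map_map]
    rw [show ((cs.length : Int) - k) = (((cs.drop k).length : Nat) : Int) by simp; omega]
    refine List.cons_eq_cons.2 ⟨slice_zero_k cs k, ?_⟩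
    rw [← ih (by simp; omega)]
    refine List.map_congr_left (fun i hi => ?_)
    have hi0 : 0 ≤ i := ((PySem.List.mem_pyRange_iff_of_pos (by exact_mod_cast hk) i).1 hi).1
    show PySem.List.slice cs (some (i + k)) (some (i + k + k)) = PySem.List.slice (cs.drop k) (some i) (some (i + k))
    exact slice_shift cs k (le_of_lt hkn) i hi0

theorem chunk_pad (k : Nat) (hk : 0 < k) : ∀ (cs : List Char), cs ≠ [] →
    ∃ rest last, pvChunk k cs = rest ++ [last] ∧ (∀ r ∈ rest, r.length = k) ∧
      0 < last.length ∧ last.length ≤ k ∧ rest.flatten ++ last = cs := by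
  intro cs
  fun_induction pvChunk k cs with
  | case1 cs h =>
    intro hne
    exact ⟨[], cs, by simp, by simp, List.length_pos_of_ne_nil hne, by omega, by simp⟩
  | case2 cs h ih =>
    intro _
    obtain ⟨rest, last, he, hr, h0, hl, hf⟩ := ih (by simp; omega)
    refine ⟨cs.take k :: rest, last, by simp [he], ?_, h0, hl, ?_⟩
    · intro r hr'
      rcases List.mem_cons.1 hr' with rfl | hr'
      · simp; omega
      · exact hr r hr'
    · simp [hf, List.take_append_drop]

theorem pad_mod (n k pad d : Nat) (hk : 0 < k) (hpad : pad < k) (hd : n + pad = d * k) :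
    (pad : Int) = PySem.Int.mod (-(n : Int)) (k : Int) := by
  rw [PySem.Int.mod_eq_emod_of_pos (by exact_mod_cast hk)]
  have hd' : (n : Int) + pad = (d : Int) * k := by exact_mod_cast hd
  have h1 : (-(n : Int)) = (pad : Int) - d * k := by omega
  rw [h1, Int.sub_emod, Int.mul_emod_left]
  have h2 : (pad : Int) % k = pad := Int.emod_eq_of_lt (by omega) (by exact_mod_cast hpad)
  rw [h2]
  simp only [Int.sub_zero]
  exact h2.symm

theorem flatten_strided (k i : Nat) (hik : i < k) : ∀ rows : List (List Char), (∀ r ∈ rows, r.length = k) →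
    List.filterMap (fun j => rows.flatten[(i + k * j)]?) (List.range rows.length)
      = rows.map (fun r => r[i]?.getD ' ') := by
  intro rows
  induction rows with
  | nil => simp
  | cons r rs ih =>
    intro hall
    have hrk : r.length = k := hall r (by simp)
    simp only [List.length_cons, List.range_succ_eq_map, List.filterMap_cons, List.flatten_cons]
    rw [List.filterMap_map]
    have h0 : (r ++ rs.flatten)[(i + k * 0)]? = some (r[i]?.getD ' ') := by
      rw [Nat.mul_zero, Nat.add_zero, List.getElem?_append_left (by omega)]
      simp [List.getElem?_eq_getElem (by omega : i < r.length)]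
    rw [h0]
    have hstep : ∀ j, ((fun j => (r ++ rs.flatten)[(i + k * j)]?) ∘ Nat.succ) j
        = (fun j => rs.flatten[(i + k * j)]?) j := by
      intro j
      simp only [Function.comp_apply]
      rw [List.getElem?_append_right (by simp [hrk]; nlinarith)]
      congr 1
      simp [hrk]; ring_nf; omega
    rw [List.filterMap_congr (fun j _ => hstep j), ih (fun r hr => hall r (by simp [hr]))]
    simp

theorem strided (k : Nat) (hk : 0 < k) (i : Nat) (hik : i < k) (rows : List (List Char))
    (hall : ∀ r ∈ rows, r.length = k) :
    PySem.List.slice? rows.flatten (some (i : Int)) none (k : Int)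
      = some (rows.map (fun r => r[i]?.getD ' ')) := by
  have hlen : rows.flatten.length = rows.length * k := by
    rw [List.length_flatten]
    induction rows with
    | nil => simp
    | cons r rs ih =>
      simp only [List.map_cons, List.sum_cons, hall r (by simp), List.length_cons]
      rw [ih (fun r hr => hall r (by simp [hr]))]
      ring
  by_cases hrows : rows = []
  · subst hrows
    simp [PySem.List.slice?, PySem.List.sliceIndices, hk.ne']
  · have hL : 0 < rows.length := List.length_pos_of_ne_nil hrows
    have hik' : i < rows.flatten.length := by rw [hlen]; nlinarith
    simp only [PySem.List.slice?, PySem.List.sliceIndices,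
      if_neg (show ¬ ((k:Int) = 0) by exact_mod_cast hk.ne'),
      if_neg (show ¬ ((k:Int) < 0) by omega),
      if_neg (show ¬ ((i:Int) < 0) by omega),
      if_pos (show (0:Int) < (k:Int) by exact_mod_cast hk)]
    have hmin : min (i:Int) (rows.flatten.length : Int) = (i:Int) := by omega
    rw [hmin, if_pos (show (i:Int) < (rows.flatten.length : Int) by exact_mod_cast hik')]
    have hcount : (((rows.flatten.length : Int) - i + k - 1) / k).toNat = rows.length := by
      rw [hlen]
      have : ((rows.length * k : Nat) : Int) - i + k - 1 = ((k : Int) - 1 - i) + rows.length * k := by push_cast; ring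
      rw [this, Int.add_mul_ediv_right _ _ (show (k:Int) ≠ 0 by exact_mod_cast hk.ne'),
        Int.ediv_eq_zero_of_lt (by omega) (by omega)]
      omega
    rw [hcount]
    rw [List.filterMap_congr (g := fun j => rows.flatten[(i + k * j)]?) (by
      intro j _
      norm_cast)]
    exact congrArg some (flatten_strided k i hik rows hall)

theorem col_fold (i : Int) (rows : List (List Char)) (hall : ∀ r ∈ rows, i < (r.length : Int)) :
    ∀ acc : List Char,
    rows.foldl (fun acc linha => if i < (linha.length : Int) then acc ++ [PySem.List.pyGetD linha i ' '] else acc) acc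
      = acc ++ rows.map (fun r => PySem.List.pyGetD r i ' ') := by
  induction rows with
  | nil => simp
  | cons r rs ih =>
    intro acc
    simp only [List.foldl_cons, if_pos (hall r (by simp)), List.map_cons]
    rw [ih (fun r hr => hall r (by simp [hr]))]
    simp

theorem join_nil_flatten (xss : List (List Char)) : PySem.Chars.join [] xss = xss.flatten := by
  simp only [PySem.Chars.join]
  induction xss with
  | nil => simp [List.intercalate]
  | cons xs xss ih =>
    cases xss with
    | nil => simp [List.intercalate]
    | cons y ys =>
      simp only [List.intercalate, List.intersperse] at ih ⊢
      simp only [List.flatten_cons] at ih ⊢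
      simp [ih]

theorem pyGet?_concat_neg_one {α : Type} (xs : List α) (x : α) :
    PySem.List.pyGet? (xs ++ [x]) (-1) = some x := by
  simp [PySem.List.pyGet?, PySem.List.pyIdx?]

theorem transpor_main (texto chave : String) (ht : texto ≠ "") (hc : chave ≠ "") :
    transpor texto chave = transpor_alt texto chave := by
  have htt : texto.toList ≠ [] := fun h => ht (String.toList_eq_nil_iff.1 h)
  have hct : chave.toList ≠ [] := fun h => hc (String.toList_eq_nil_iff.1 h)
  simp only [transpor, transpor_alt]
  have hk : 0 < chave.toList.length := List.length_pos_of_ne_nil hct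
  have hn : 0 < texto.toList.length := List.length_pos_of_ne_nil htt
  rw [chunk_rows chave.toList.length hk texto.toList htt]
  obtain ⟨rest, last, he, hr, h0, hl, hf⟩ := chunk_pad chave.toList.length hk texto.toList htt
  rw [he, pyGet?_concat_neg_one]
  simp only [Option.getD_some]
  set K := chave.toList.length with hK
  set pad : Nat := K - last.length with hpad
  have hpadint : ((K:Int) - (last.length:Int)) = (pad:Int) := by omega
  have hmat : (if 0 < (K:Int) - (last.length:Int) then
        (rest ++ [last]).dropLast ++ [last ++ List.replicate ((K:Int) - (last.length:Int)).toNat 'X']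
      else rest ++ [last]) = rest ++ [last ++ List.replicate pad 'X'] := by
    split_ifs with hcond
    · rw [List.dropLast_concat, show ((K:Int) - (last.length:Int)).toNat = pad from by omega]
    · have hz : pad = 0 := by omega
      simp [hz]
  rw [hmat, hpadint]
  set P := rest ++ [last ++ List.replicate pad 'X'] with hP
  have hPlen : ∀ r ∈ P, r.length = K := by
    intro r hrP
    rcases List.mem_append.1 hrP with h' | h'
    · exact hr r h'
    · simp at h'
      subst h'
      simp
      omega
  have hPflat : P.flatten = texto.toList ++ List.replicate pad 'X' := by
    rw [hP, List.flatten_concat, ← hf, List.append_assoc]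
  have h5 : rest.flatten.length = rest.length * K := by
    rw [List.length_flatten, show rest.map List.length = List.replicate rest.length K from
      List.map_eq_replicate_iff.mpr hr]
    simp [List.sum_replicate]
  have hd : texto.toList.length + pad = (rest.length + 1) * K := by
    have h6 := congrArg List.length hf
    rw [List.length_append, h5] at h6
    rw [add_one_mul]
    omega
  have hpadlt : pad < K := by omega
  have hmod : (pad : Int) = PySem.Int.mod (-(texto.toList.length : Int)) (K : Int) :=
    pad_mod texto.toList.length K pad (rest.length + 1) hk hpadlt hd
  rw [← hmod]
  rw [sorted2_pairs_eq chave.toList]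
  set order := PySem.List.sorted (PySem.List.pyRange 0 (K:Int) 1) (fun i => PySem.List.pyGetD chave.toList i ' ') with horder
  have hmem : ∀ i ∈ order, 0 ≤ i ∧ i < (K:Int) := by
    intro i hi
    have := (PySem.List.mem_sorted _ _ _ i).1 hi
    exact PySem.List.mem_pyRange_one.1 this
  rw [List.foldl_map]
  rw [PySem.List.foldl_congr_mem order _ (fun acc i => acc ++ P.map (fun r => PySem.List.pyGetD r i ' ')) []
    (by
      intro acc i hi
      exact col_fold i P (fun r hrP => by rw [hPlen r hrP]; exact (hmem i hi).2) acc)]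
  rw [PySem.List.foldl_append_eq_flatMap, List.flatMap_def, join_nil_flatten]
  rw [Int.toNat_natCast, ← hPflat, List.nil_append]
  congr 1
  symm
  congr 1
  refine congrArg List.flatten (List.map_congr_left (fun i hi => ?_))
  obtain ⟨hi0, hik⟩ := hmem i hi
  rw [show (some i) = some ((i.toNat : Nat) : Int) by rw [Int.toNat_of_nonneg hi0]]
  rw [strided K hk i.toNat (by omega) P hPlen, Option.getD_some]
  refine (List.map_congr_left (fun r _ => ?_)).symm
  rw [PySem.List.pyGetD_of_nonneg _ _ hi0, List.getD_eq_getElem?_getD]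

-- ===== VERDICT (by name: the statement is the Claim_ definition above) =====
theorem transpor_spec : Claim_equal_transpor := by
  intro texto chave _ hpre
  show transpor texto chave = transpor_alt texto chave
  exact transpor_main texto chave hpre.1 hpre.2
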